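-- pv_equiv track=rewrite | github.com/piccoli/advent-of-code-2018-solutions | day06.py | assign_labels
-- ===== SOURCE A (Python) =====
-- from itertools import product
--
-- def distance(x1, y1, x2, y2):
--     return abs(x2 - x1) + abs(y2 - y1)
--
-- def assign_labels(seeds, x1, y1, x2, y2):
--     dist = {
--         (y, x): float("+inf")
--             for y, x in product(
--                 range(y1, y2 + 1),
--                 range(x1, x2 + 1)
--             )
--     }
--
--     labels = {
--         (y, x): 0
--             for y, x in product(
--                 range(y1, y2 + 1),
--                 range(x1, x2 + 1)
--             )
--     }
--
--     for k, (x, y) in enumerate(seeds):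
--         for i, j in product(
--                 range(y1, y2 + 1),
--                 range(x1, x2 + 1)):
--             d = distance(x, y, j, i)
--
--             if d < dist[i, j]:
--                 dist[i, j] = d
--                 labels[i, j] = k
--
--             elif d == dist[i, j]:
--                 labels[i, j] = -1
--
--     return labels
-- ===== SOURCE B (Python) =====
-- def assign_labels(seeds, x1, y1, x2, y2):
--     # Per-cell: compute all seed distances once, then min/count/index.
--     labels = {}
--     for y in range(y1, y2 + 1):
--         for x in range(x1, x2 + 1):
--             ds = [abs(sx - x) + abs(sy - y) for sx, sy in seeds]
--             m = min(ds)
--             labels[(y, x)] = ds.index(m) if ds.count(m) == 1 else -1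
--     return labels
-- ===== Notes on version B (the rewrite author's own statement) =====
-- stated objective: simpler
-- what changed: Instead of sweeping the whole grid once per seed while mutating two dicts of running minima/labels, B visits each cell once, builds its seed-distance list and decides the label directly by min/count/index.
-- outside the precondition, e.g. on assign_labels([], 0, 0, 0, 0): A returns {(0, 0): 0}, B raises ValueError
import Mathlib
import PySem

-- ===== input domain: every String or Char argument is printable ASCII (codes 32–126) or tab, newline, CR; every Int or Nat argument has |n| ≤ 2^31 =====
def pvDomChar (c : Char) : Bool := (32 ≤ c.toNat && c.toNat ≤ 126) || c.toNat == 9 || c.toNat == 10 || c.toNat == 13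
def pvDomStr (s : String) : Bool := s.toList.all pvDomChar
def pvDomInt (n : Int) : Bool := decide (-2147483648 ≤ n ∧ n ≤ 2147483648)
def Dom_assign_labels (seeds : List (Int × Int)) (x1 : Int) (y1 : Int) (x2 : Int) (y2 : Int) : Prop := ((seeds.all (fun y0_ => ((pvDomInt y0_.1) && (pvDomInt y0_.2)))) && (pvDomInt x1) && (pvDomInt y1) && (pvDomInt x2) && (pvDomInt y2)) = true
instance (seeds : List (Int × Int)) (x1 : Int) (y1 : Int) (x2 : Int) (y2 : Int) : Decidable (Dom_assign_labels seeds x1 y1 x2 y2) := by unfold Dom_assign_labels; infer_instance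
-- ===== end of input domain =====

-- B replaces A's per-seed grid sweep over two running dicts by a single per-cell pass
-- deciding each label directly via min/count/index (simpler); equivalence on Pre_,
-- which excludes empty seeds with a nonempty grid (there B's min() raises).

-- ===== PORT A =====
def pvDistance (x1 y1 x2 y2 : Int) : Int := |x2 - x1| + |y2 - y1|

-- product(range(y1, y2+1), range(x1, x2+1)) : the (y, x) grid cells, row-major
def pvProductYX (x1 y1 x2 y2 : Int) : List (Int × Int) :=
  (PySem.List.pyRange y1 (y2 + 1) 1).flatMap (fun y =>
    (PySem.List.pyRange x1 (x2 + 1) 1).map (fun x => (y, x)))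

-- float("+inf") is modelled as (none : Option Int): every stored distance is a finite
-- int, so 'd < inf' is true and 'd == inf' is false — exact on all inputs.
def pvLtInf (d : Int) (o : Option Int) : Bool := match o with | none => true | some m => d < m
def pvEqInf (d : Int) (o : Option Int) : Bool := match o with | none => false | some m => d == m

-- the body of the inner 'for i, j in product(...)' loop, p = (k, (x, y)), c = (i, j)
def pvInnerStep (p : Int × (Int × Int))
    (st : PySem.Dict (Int × Int) (Option Int) × PySem.Dict (Int × Int) Int)
    (c : Int × Int) :
    PySem.Dict (Int × Int) (Option Int) × PySem.Dict (Int × Int) Int :=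
  let d := pvDistance p.2.1 p.2.2 c.2 c.1
  let cur := (st.1.get? c).getD none  -- dist[i, j]; the key is always present
  if pvLtInf d cur then (st.1.insert c (some d), st.2.insert c p.1)
  else if pvEqInf d cur then (st.1, st.2.insert c (-1))
  else st

-- the body of the outer 'for k, (x, y) in enumerate(seeds)' loop
def pvOuterStep (cells : List (Int × Int))
    (st : PySem.Dict (Int × Int) (Option Int) × PySem.Dict (Int × Int) Int)
    (p : Int × (Int × Int)) :
    PySem.Dict (Int × Int) (Option Int) × PySem.Dict (Int × Int) Int :=
  cells.foldl (pvInnerStep p) st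

def assign_labels (seeds : List (Int × Int)) (x1 : Int) (y1 : Int) (x2 : Int) (y2 : Int) : List (Int × Int × Int) :=
  let cells := pvProductYX x1 y1 x2 y2
  let dist0 : PySem.Dict (Int × Int) (Option Int) :=
    cells.foldl (fun d c => d.insert c none) PySem.Dict.empty
  let labels0 : PySem.Dict (Int × Int) Int :=
    cells.foldl (fun d c => d.insert c 0) PySem.Dict.empty
  let st := (PySem.List.enumerate seeds 0).foldl (pvOuterStep cells) (dist0, labels0)
  st.2.items.map (fun p => (p.1.1, p.1.2, p.2))

-- ===== PORT B =====
def pvBestLabel (seeds : List (Int × Int)) (y x : Int) : Int :=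
  let ds := seeds.map (fun s => |s.1 - x| + |s.2 - y|)
  match PySem.List.min? ds (fun v => v) with
  | none => -1
  | some m =>
      if PySem.List.count ds m == 1 then (((PySem.List.index? ds m).getD 0 : Nat) : Int)
      else -1

def assign_labels_alt (seeds : List (Int × Int)) (x1 : Int) (y1 : Int) (x2 : Int) (y2 : Int) : List (Int × Int × Int) :=
  (PySem.List.pyRange y1 (y2 + 1) 1).flatMap (fun y =>
    (PySem.List.pyRange x1 (x2 + 1) 1).map (fun x => (y, x, pvBestLabel seeds y x)))

-- ===== PRECONDITION & SPEC =====
-- Pre_ excludes empty seeds with a nonempty grid: there A still returns its leftover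
-- dict-initialiser label 0 for every cell (naming a seed that does not exist), while
-- B's min() of the empty distance list raises ValueError.
def Pre_assign_labels (seeds : List (Int × Int)) (x1 : Int) (y1 : Int) (x2 : Int) (y2 : Int) : Prop :=
  seeds = [] → (x2 < x1 ∨ y2 < y1)
instance (seeds : List (Int × Int)) (x1 : Int) (y1 : Int) (x2 : Int) (y2 : Int) : Decidable (Pre_assign_labels seeds x1 y1 x2 y2) := by unfold Pre_assign_labels; infer_instance

def pvWitness_assign_labels : (List (Int × Int)) × Int × Int × Int × Int := ([(1, 2)], 0, 0, 1, 1)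

def Spec_assign_labels (seeds : List (Int × Int)) (x1 : Int) (y1 : Int) (x2 : Int) (y2 : Int) (out : List (Int × Int × Int)) : Prop := out = assign_labels_alt seeds x1 y1 x2 y2
instance (seeds : List (Int × Int)) (x1 : Int) (y1 : Int) (x2 : Int) (y2 : Int) (out : List (Int × Int × Int)) : Decidable (Spec_assign_labels seeds x1 y1 x2 y2 out) := by unfold Spec_assign_labels; infer_instance

-- ===== CLAIM (what is proved, stated in full; the proofs are below) =====
def Claim_equal_assign_labels : Prop := ∀ (seeds : List (Int × Int)) (x1 : Int) (y1 : Int) (x2 : Int) (y2 : Int), Dom_assign_labels seeds x1 y1 x2 y2 → Pre_assign_labels seeds x1 y1 x2 y2 → Spec_assign_labels seeds x1 y1 x2 y2 (assign_labels seeds x1 y1 x2 y2)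

-- ===== LEMMAS AND PROOFS =====

-- the distances from every seed to cell c, in seed order
def pvDs (seeds : List (Int × Int)) (c : Int × Int) : List Int :=
  seeds.map (fun s => |s.1 - c.2| + |s.2 - c.1|)

-- the per-cell pure state machine A runs for one cell
def pvStepCell (c : Int × Int) (st : Option Int × Int) (p : Int × (Int × Int)) : Option Int × Int :=
  let d := pvDistance p.2.1 p.2.2 c.2 c.1
  if pvLtInf d st.1 then (some d, p.1)
  else if pvEqInf d st.1 then (st.1, -1)
  else st

def pvCellFold (seeds : List (Int × Int)) (s : Int) (c : Int × Int) (st : Option Int × Int) : Option Int × Int :=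
  (PySem.List.enumerate seeds s).foldl (pvStepCell c) st

-- the closed form B computes per cell
def pvModel (seeds : List (Int × Int)) (c : Int × Int) : Option Int × Int :=
  match PySem.List.min? (pvDs seeds c) (fun v => v) with
  | none => (none, 0)
  | some m =>
      (some m,
       if PySem.List.count (pvDs seeds c) m == 1
       then (((PySem.List.index? (pvDs seeds c) m).getD 0 : Nat) : Int) else -1)

lemma pv_nodup_cells (x1 y1 x2 y2 : Int) : (pvProductYX x1 y1 x2 y2).Nodup := by
  unfold pvProductYX
  rw [List.nodup_flatMap]
  constructor
  · intro y _
    exact (PySem.List.nodup_pyRange_one _ _).map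
      (fun a b h => (Prod.ext_iff.mp h).2)
  · have hnd := PySem.List.nodup_pyRange_one y1 (y2 + 1)
    refine List.Pairwise.imp ?_ (List.Nodup.pairwise_of_forall_ne hnd (fun a _ b _ h => h))
    intro a b hne p hp hq
    simp only [List.mem_map] at hp hq
    obtain ⟨xa, _, rfl⟩ := hp
    obtain ⟨xb, _, h2⟩ := hq
    exact hne (Prod.ext_iff.mp h2).1.symm

lemma pv_min?_append_singleton (l : List Int) (d : Int) :
    PySem.List.min? (l ++ [d]) (fun v => v) =
      some (match PySem.List.min? l (fun v => v) with | none => d | some m => min m d) := by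
  cases l with
  | nil =>
      have h0 : PySem.List.min? ([] : List Int) (fun v => v) = none :=
        (PySem.List.min?_eq_none_iff _ _).mpr rfl
      simp [h0, PySem.List.min?_id_cons]
  | cons x t =>
      rw [List.cons_append, PySem.List.min?_id_cons, PySem.List.min?_id_cons]
      simp [List.foldl_append]

-- initial dicts: items are the cells paired with the constant
lemma pv_init_items {ν : Type} (cells : List (Int × Int)) (h : cells.Nodup) (v : ν) :
    (cells.foldl (fun d c => d.insert c v) PySem.Dict.empty).items
      = cells.map (fun c => (c, v)) := by
  have := PySem.Dict.items_foldl_insert_fresh cells (fun c => c) (fun _ => v) PySem.Dict.empty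
    (by intro a _; simp) (by simpa using h)
  simpa using this

-- let-free unfoldings of the two step functions
lemma pvInnerStep_eq (p : Int × (Int × Int))
    (st : PySem.Dict (Int × Int) (Option Int) × PySem.Dict (Int × Int) Int)
    (c : Int × Int) :
    pvInnerStep p st c =
      (if pvLtInf (pvDistance p.2.1 p.2.2 c.2 c.1) ((st.1.get? c).getD none)
       then (st.1.insert c (some (pvDistance p.2.1 p.2.2 c.2 c.1)), st.2.insert c p.1)
       else if pvEqInf (pvDistance p.2.1 p.2.2 c.2 c.1) ((st.1.get? c).getD none)
       then (st.1, st.2.insert c (-1))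
       else st) := rfl

lemma pvStepCell_eq (c : Int × Int) (st : Option Int × Int) (p : Int × (Int × Int)) :
    pvStepCell c st p =
      (if pvLtInf (pvDistance p.2.1 p.2.2 c.2 c.1) st.1
       then (some (pvDistance p.2.1 p.2.2 c.2 c.1), p.1)
       else if pvEqInf (pvDistance p.2.1 p.2.2 c.2 c.1) st.1
       then (st.1, -1)
       else st) := rfl

-- one inner pass: pointwise effect on the dist dict
lemma pv_innerPass_get?_fst (p : Int × (Int × Int)) :
    ∀ (ks : List (Int × Int))
      (st : PySem.Dict (Int × Int) (Option Int) × PySem.Dict (Int × Int) Int)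
      (c : Int × Int),
      (ks.foldl (pvInnerStep p) st).1.get? c
        = if c ∈ ks ∧ pvLtInf (pvDistance p.2.1 p.2.2 c.2 c.1) ((st.1.get? c).getD none) = true
          then some (some (pvDistance p.2.1 p.2.2 c.2 c.1))
          else st.1.get? c := by
  intro ks
  induction ks with
  | nil => intro st c; simp
  | cons a t ih =>
      intro st c
      rw [List.foldl_cons, ih]
      by_cases hca : c = a
      · subst hca
        by_cases hlt : pvLtInf (pvDistance p.2.1 p.2.2 c.2 c.1) ((st.1.get? c).getD none) = true
        · have hstep : (pvInnerStep p st c).1.get? c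
              = some (some (pvDistance p.2.1 p.2.2 c.2 c.1)) := by
            rw [pvInnerStep_eq, if_pos hlt]
            simp [PySem.Dict.get?_insert_self]
          rw [hstep, if_pos (And.intro (List.mem_cons_self) hlt)]
          split_ifs <;> rfl
        · have hstep : (pvInnerStep p st c).1.get? c = st.1.get? c := by
            rw [pvInnerStep_eq, if_neg hlt]
            split_ifs <;> rfl
          rw [hstep]
          simp [List.mem_cons, hlt]
      · have h1 : (pvInnerStep p st a).1.get? c = st.1.get? c := by
          rw [pvInnerStep_eq]
          split_ifs <;> simp [PySem.Dict.get?_insert_of_ne _ _ hca]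
        rw [h1]
        simp [List.mem_cons, hca]

-- one inner pass: pointwise effect on the labels dict
lemma pv_innerPass_get?_snd (p : Int × (Int × Int)) :
    ∀ (ks : List (Int × Int)) (_ : ks.Nodup)
      (st : PySem.Dict (Int × Int) (Option Int) × PySem.Dict (Int × Int) Int)
      (c : Int × Int),
      (ks.foldl (pvInnerStep p) st).2.get? c
        = if c ∈ ks then
            (if pvLtInf (pvDistance p.2.1 p.2.2 c.2 c.1) ((st.1.get? c).getD none) then some p.1
             else if pvEqInf (pvDistance p.2.1 p.2.2 c.2 c.1) ((st.1.get? c).getD none) then some (-1)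
             else st.2.get? c)
          else st.2.get? c := by
  intro ks
  induction ks with
  | nil => intro _ st c; simp
  | cons a t ih =>
      intro hnd st c
      have hat : a ∉ t := (List.nodup_cons.mp hnd).1
      have hndt : t.Nodup := (List.nodup_cons.mp hnd).2
      rw [List.foldl_cons, ih hndt]
      by_cases hca : c = a
      · subst hca
        have h1 : (pvInnerStep p st c).2.get? c
            = (if pvLtInf (pvDistance p.2.1 p.2.2 c.2 c.1) ((st.1.get? c).getD none) then some p.1
               else if pvEqInf (pvDistance p.2.1 p.2.2 c.2 c.1) ((st.1.get? c).getD none) then some (-1)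
               else st.2.get? c) := by
          rw [pvInnerStep_eq]
          split_ifs <;> simp [PySem.Dict.get?_insert_self]
        simp [hat, List.mem_cons, h1]
      · have h1 : (pvInnerStep p st a).1.get? c = st.1.get? c := by
          rw [pvInnerStep_eq]
          split_ifs <;> simp [PySem.Dict.get?_insert_of_ne _ _ hca]
        have h2 : (pvInnerStep p st a).2.get? c = st.2.get? c := by
          rw [pvInnerStep_eq]
          split_ifs <;> simp [PySem.Dict.get?_insert_of_ne _ _ hca]
        rw [h1, h2]
        simp [List.mem_cons, hca]

-- one inner pass keeps both key lists (every updated key is already present)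
lemma pv_innerPass_keys (p : Int × (Int × Int)) :
    ∀ (ks : List (Int × Int))
      (st : PySem.Dict (Int × Int) (Option Int) × PySem.Dict (Int × Int) Int),
      (∀ c ∈ ks, st.1.contains c = true ∧ st.2.contains c = true) →
      (ks.foldl (pvInnerStep p) st).1.keys = st.1.keys
        ∧ (ks.foldl (pvInnerStep p) st).2.keys = st.2.keys := by
  intro ks
  induction ks with
  | nil => intro st _; simp
  | cons a t ih =>
      intro st hc
      have ha := hc a (by simp)
      have hstep1 : (pvInnerStep p st a).1.keys = st.1.keys := by
        rw [pvInnerStep_eq]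
        split_ifs <;> simp [PySem.Dict.keys_insert_of_contains _ _ ha.1]
      have hstep2 : (pvInnerStep p st a).2.keys = st.2.keys := by
        rw [pvInnerStep_eq]
        split_ifs <;> simp [PySem.Dict.keys_insert_of_contains _ _ ha.2]
      rw [List.foldl_cons]
      have hct : ∀ c ∈ t, (pvInnerStep p st a).1.contains c = true
          ∧ (pvInnerStep p st a).2.contains c = true := by
        intro c hctm
        have h := hc c (by simp [hctm])
        constructor
        · rw [PySem.Dict.contains_iff_mem_keys, hstep1, ← PySem.Dict.contains_iff_mem_keys]
          exact h.1
        · rw [PySem.Dict.contains_iff_mem_keys, hstep2, ← PySem.Dict.contains_iff_mem_keys]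
          exact h.2
      obtain ⟨k1, k2⟩ := ih (pvInnerStep p st a) hct
      exact ⟨k1.trans hstep1, k2.trans hstep2⟩

-- the outer loop keeps both key lists
lemma pv_outerPass_keys (cells : List (Int × Int)) :
    ∀ (es : List (Int × (Int × Int)))
      (st : PySem.Dict (Int × Int) (Option Int) × PySem.Dict (Int × Int) Int),
      (∀ c ∈ cells, st.1.contains c = true ∧ st.2.contains c = true) →
      (es.foldl (pvOuterStep cells) st).1.keys = st.1.keys
        ∧ (es.foldl (pvOuterStep cells) st).2.keys = st.2.keys := by
  intro es
  induction es with
  | nil => intro st _; simp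
  | cons p t ih =>
      intro st hc
      obtain ⟨k1, k2⟩ := pv_innerPass_keys p cells st hc
      have hct : ∀ c ∈ cells, (pvOuterStep cells st p).1.contains c = true
          ∧ (pvOuterStep cells st p).2.contains c = true := by
        intro c hcm
        have h := hc c hcm
        simp only [pvOuterStep]
        constructor
        · rw [PySem.Dict.contains_iff_mem_keys, k1, ← PySem.Dict.contains_iff_mem_keys]
          exact h.1
        · rw [PySem.Dict.contains_iff_mem_keys, k2, ← PySem.Dict.contains_iff_mem_keys]
          exact h.2
      rw [List.foldl_cons]
      obtain ⟨m1, m2⟩ := ih (pvOuterStep cells st p) hct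
      exact ⟨m1.trans k1, m2.trans k2⟩

-- the outer loop, seen from one cell: it runs the per-cell state machine
lemma pv_outerPass_get? (cells : List (Int × Int)) (hnd : cells.Nodup) :
    ∀ (seeds : List (Int × Int)) (s : Int)
      (st : PySem.Dict (Int × Int) (Option Int) × PySem.Dict (Int × Int) Int)
      (c : Int × Int), c ∈ cells →
      ∀ (o : Option Int) (lab : Int),
        st.1.get? c = some o → st.2.get? c = some lab →
        ((PySem.List.enumerate seeds s).foldl (pvOuterStep cells) st).1.get? c
            = some (pvCellFold seeds s c (o, lab)).1
          ∧ ((PySem.List.enumerate seeds s).foldl (pvOuterStep cells) st).2.get? c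
            = some (pvCellFold seeds s c (o, lab)).2 := by
  intro seeds
  induction seeds with
  | nil =>
      intro s st c _ o lab h1 h2
      simp [PySem.List.enumerate_nil, pvCellFold, h1, h2]
  | cons q t ih =>
      intro s st c hc o lab h1 h2
      rw [PySem.List.enumerate_cons, List.foldl_cons]
      have hcf : pvCellFold (q :: t) s c (o, lab)
          = pvCellFold t (s + 1) c (pvStepCell c (o, lab) (s, q)) := by
        simp [pvCellFold, PySem.List.enumerate_cons]
      rw [hcf]
      have hin1 := pv_innerPass_get?_fst (s, q) cells st c
      have hin2 := pv_innerPass_get?_snd (s, q) cells hnd st c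
      rw [if_pos hc] at hin2
      have hcur : ((st.1.get? c).getD none) = o := by rw [h1]; rfl
      rw [hcur] at hin1 hin2
      have hg1 : (pvOuterStep cells st (s, q)).1.get? c = some (pvStepCell c (o, lab) (s, q)).1 := by
        show (cells.foldl (pvInnerStep (s, q)) st).1.get? c = _
        rw [hin1, pvStepCell_eq]
        by_cases hlt : pvLtInf (pvDistance q.1 q.2 c.2 c.1) o = true
        · simp [hc, hlt]
        · rw [if_neg (by simp [hlt]), h1]
          rw [if_neg (by simpa using hlt)]
          split_ifs <;> rfl
      have hg2 : (pvOuterStep cells st (s, q)).2.get? c = some (pvStepCell c (o, lab) (s, q)).2 := by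
        show (cells.foldl (pvInnerStep (s, q)) st).2.get? c = _
        rw [hin2, pvStepCell_eq]
        split_ifs <;> simp [h2]
      exact ih (s + 1) (pvOuterStep cells st (s, q)) c hc _ _ hg1 hg2
lemma pv_ds_append (ts : List (Int × Int)) (t : Int × Int) (c : Int × Int) :
    pvDs (ts ++ [t]) c = pvDs ts c ++ [|t.1 - c.2| + |t.2 - c.1|] := by
  simp [pvDs]

lemma pv_cellFold_append (ts : List (Int × Int)) (t : Int × Int) (c : Int × Int) :
    pvCellFold (ts ++ [t]) 0 c (none, 0)
      = pvStepCell c (pvCellFold ts 0 c (none, 0)) ((ts.length : Int), t) := by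
  simp [pvCellFold, PySem.List.enumerate_append, List.foldl_append, PySem.List.enumerate_cons,
    PySem.List.enumerate_nil]

lemma pv_dist_comm (t c : Int × Int) :
    pvDistance t.1 t.2 c.2 c.1 = |t.1 - c.2| + |t.2 - c.1| := by
  unfold pvDistance
  rw [abs_sub_comm, abs_sub_comm c.1]

lemma pv_cellFold_eq_model (c : Int × Int) :
    ∀ seeds : List (Int × Int), pvCellFold seeds 0 c (none, 0) = pvModel seeds c := by
  intro seeds
  induction seeds using List.reverseRecOn with
  | nil =>
      have h0 : PySem.List.min? (pvDs [] c) (fun v => v) = none :=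
        (PySem.List.min?_eq_none_iff _ _).mpr (by simp [pvDs])
      simp [pvCellFold, PySem.List.enumerate_nil, pvModel, h0]
  | append_singleton ts t ih =>
      rw [pv_cellFold_append, ih, pvStepCell_eq]
      have hd := pv_dist_comm t c
      rcases hmin : PySem.List.min? (pvDs ts c) (fun v => v) with _ | m
      · -- no previous seeds: ts = []
        have hts' : ts = [] := by
          have hts : pvDs ts c = [] := (PySem.List.min?_eq_none_iff _ _).mp hmin
          simpa [pvDs] using hts
        subst hts'
        have hds : pvDs ([] ++ [t]) c = [|t.1 - c.2| + |t.2 - c.1|] := by simp [pvDs]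
        have h1 : PySem.List.min? (pvDs ([] ++ [t]) c) (fun v => v)
            = some (|t.1 - c.2| + |t.2 - c.1|) := by
          rw [hds, PySem.List.min?_id_cons]; simp
        have hm0 : pvModel [] c = (none, 0) := by
          unfold pvModel
          rw [hmin]
        have hmodel : pvModel ([] ++ [t]) c = (some (|t.1 - c.2| + |t.2 - c.1|), 0) := by
          unfold pvModel
          rw [h1, hds]
          simp
        rw [hm0, hmodel]
        simp [hd, pvLtInf]
      · have hmem : m ∈ pvDs ts c := PySem.List.min?_mem hmin
        have hmin' : ∀ y ∈ pvDs ts c, m ≤ y := PySem.List.min?_isMin hmin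
        have hnew : PySem.List.min? (pvDs (ts ++ [t]) c) (fun v => v)
            = some (min m (|t.1 - c.2| + |t.2 - c.1|)) := by
          have := pv_min?_append_singleton (pvDs ts c) (|t.1 - c.2| + |t.2 - c.1|)
          rw [hmin] at this
          rw [← pv_ds_append] at this
          simpa using this
        rcases lt_trichotomy (|t.1 - c.2| + |t.2 - c.1|) m with hlt | heq | hgt
        · -- strictly better: new unique minimum at index ts.length
          have hnot : (|t.1 - c.2| + |t.2 - c.1|) ∉ pvDs ts c := fun hmem' =>
            absurd (hmin' _ hmem') (not_le.mpr hlt)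
          have hcount : List.count (|t.1 - c.2| + |t.2 - c.1|) (pvDs (ts ++ [t]) c) = 1 := by
            rw [pv_ds_append]
            simp [List.count_append, List.count_eq_zero.mpr hnot]
          have hidx : List.idxOf? (|t.1 - c.2| + |t.2 - c.1|) (pvDs (ts ++ [t]) c)
              = some (pvDs ts c).length := by
            have := PySem.List.index?_append_singleton_self (pvDs ts c) _ hnot
            rw [PySem.List.index?_eq_idxOf?] at this
            rw [pv_ds_append]
            exact this
          have hlen : (pvDs ts c).length = ts.length := by simp [pvDs]
          simp [pvModel, hmin, hnew, hd, pvLtInf, hlt, min_eq_right hlt.le, hcount, hidx, hlen]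
        · -- tie with the current minimum: label -1
          have hcount : ¬ List.count m (pvDs (ts ++ [t]) c) = 1 := by
            rw [pv_ds_append]
            have hpos : 0 < List.count m (pvDs ts c) := List.count_pos_iff.mpr hmem
            simp [List.count_append, heq]
            omega
          simp [pvModel, hmin, hnew, hd, pvLtInf, pvEqInf, heq, min_self, hcount]
        · -- strictly worse: nothing changes
          have hne : (|t.1 - c.2| + |t.2 - c.1|) ≠ m := ne_of_gt hgt
          have hcount : List.count m (pvDs (ts ++ [t]) c) = List.count m (pvDs ts c) := by
            have h0 : List.count m [|t.1 - c.2| + |t.2 - c.1|] = 0 :=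
              List.count_eq_zero.mpr (by simpa using hne.symm)
            rw [pv_ds_append, List.count_append, h0]
            omega
          have hidx : List.idxOf? m (pvDs (ts ++ [t]) c) = List.idxOf? m (pvDs ts c) := by
            have := PySem.List.index?_append_of_mem [|t.1 - c.2| + |t.2 - c.1|] hmem
            rw [PySem.List.index?_eq_idxOf?, PySem.List.index?_eq_idxOf?] at this
            rw [pv_ds_append]
            exact this
          have hmod : pvModel (ts ++ [t]) c = pvModel ts c := by
            unfold pvModel
            rw [hnew, hmin, min_eq_left hgt.le]
            simp [PySem.List.count_eq, hcount, hidx]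
          have hfst : (pvModel ts c).1 = some m := by simp [pvModel, hmin]
          rw [hmod, hfst]
          simp [pvLtInf, pvEqInf, hd, not_lt.mpr hgt.le, hne]
lemma pv_assign_labels_def (seeds : List (Int × Int)) (x1 y1 x2 y2 : Int) :
    assign_labels seeds x1 y1 x2 y2 =
      ((PySem.List.enumerate seeds 0).foldl
          (pvOuterStep (pvProductYX x1 y1 x2 y2))
          ((pvProductYX x1 y1 x2 y2).foldl (fun d c => d.insert c (none : Option Int)) PySem.Dict.empty,
           (pvProductYX x1 y1 x2 y2).foldl (fun d c => d.insert c (0 : Int)) PySem.Dict.empty)).2.items.map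
        (fun p => (p.1.1, p.1.2, p.2)) := rfl

lemma pv_A_eq (seeds : List (Int × Int)) (x1 y1 x2 y2 : Int) :
    assign_labels seeds x1 y1 x2 y2
      = (pvProductYX x1 y1 x2 y2).map (fun c => (c.1, c.2, (pvModel seeds c).2)) := by
  rw [pv_assign_labels_def]
  have hnd := pv_nodup_cells x1 y1 x2 y2
  set cells := pvProductYX x1 y1 x2 y2 with hcells
  set D0 := cells.foldl (fun d c => d.insert c (none : Option Int)) PySem.Dict.empty with hD0
  set L0 := cells.foldl (fun d c => d.insert c (0 : Int)) PySem.Dict.empty with hL0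
  have hdi : D0.items = cells.map (fun c => (c, (none : Option Int))) :=
    pv_init_items cells hnd none
  have hli : L0.items = cells.map (fun c => (c, (0 : Int))) :=
    pv_init_items cells hnd 0
  have hkd : D0.keys = cells := by
    simp [PySem.Dict.keys, hdi, Function.comp_def]
  have hkl : L0.keys = cells := by
    simp [PySem.Dict.keys, hli, Function.comp_def]
  have hcont : ∀ c ∈ cells, (D0, L0).1.contains c = true ∧ (D0, L0).2.contains c = true := by
    intro c hc
    constructor
    · rw [PySem.Dict.contains_iff_mem_keys]
      rw [show (D0, L0).1.keys = cells from hkd]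
      exact hc
    · rw [PySem.Dict.contains_iff_mem_keys]
      rw [show (D0, L0).2.keys = cells from hkl]
      exact hc
  obtain ⟨hK1, hK2⟩ := pv_outerPass_keys cells (PySem.List.enumerate seeds 0) (D0, L0) hcont
  set F := (PySem.List.enumerate seeds 0).foldl (pvOuterStep cells) (D0, L0) with hF
  have hKf : F.2.keys = cells := hK2.trans hkl
  have hKnd : F.2.keys.Nodup := hKf ▸ hnd
  rw [PySem.Dict.items_eq_map_keys F.2 hKnd 0, hKf, List.map_map]
  apply List.map_congr_left
  intro c hc
  have hgd : D0.get? c = some none :=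
    PySem.Dict.get?_of_mem_items D0 (by rw [hdi]; exact List.mem_map_of_mem hc) (hkd ▸ hnd)
  have hgl : L0.get? c = some 0 :=
    PySem.Dict.get?_of_mem_items L0 (by rw [hli]; exact List.mem_map_of_mem hc) (hkl ▸ hnd)
  obtain ⟨_, hg2⟩ := pv_outerPass_get? cells hnd seeds 0 (D0, L0) c hc none 0 hgd hgl
  have hval : F.2.getD c 0 = (pvModel seeds c).2 := by
    rw [PySem.Dict.getD_eq_get?_getD, hg2, pv_cellFold_eq_model]
    rfl
  simp [hval]

lemma pv_B_eq (seeds : List (Int × Int)) (x1 y1 x2 y2 : Int) :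
    assign_labels_alt seeds x1 y1 x2 y2
      = (pvProductYX x1 y1 x2 y2).map (fun c => (c.1, c.2, pvBestLabel seeds c.1 c.2)) := by
  simp only [assign_labels_alt, pvProductYX, List.map_flatMap, List.map_map]
  rfl

lemma pv_model_snd (seeds : List (Int × Int)) (hs : seeds ≠ []) (c : Int × Int) :
    (pvModel seeds c).2 = pvBestLabel seeds c.1 c.2 := by
  unfold pvModel pvBestLabel pvDs
  cases hm : PySem.List.min? (seeds.map (fun s => |s.1 - c.2| + |s.2 - c.1|)) (fun v => v) with
  | none =>
      exact absurd (by simpa using (PySem.List.min?_eq_none_iff _ _).mp hm) hs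
  | some m => simp [hm]

lemma pv_cells_nil (x1 y1 x2 y2 : Int) (h : x2 < x1 ∨ y2 < y1) :
    pvProductYX x1 y1 x2 y2 = [] := by
  unfold pvProductYX
  rcases h with h | h
  · have hx : PySem.List.pyRange x1 (x2 + 1) 1 = [] :=
      PySem.List.pyRange_one_eq_nil (by omega)
    simp [hx]
  · have hy : PySem.List.pyRange y1 (y2 + 1) 1 = [] :=
      PySem.List.pyRange_one_eq_nil (by omega)
    simp [hy]

-- ===== VERDICT (by name: the statement is the Claim_ definition above) =====
theorem assign_labels_spec : Claim_equal_assign_labels := by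
  intro seeds x1 y1 x2 y2 _ hPre
  unfold Spec_assign_labels
  rw [pv_A_eq, pv_B_eq]
  by_cases hs : seeds = []
  · rw [pv_cells_nil _ _ _ _ (hPre hs)]
    rfl
  · exact List.map_congr_left (fun c _ => by rw [pv_model_snd seeds hs c])
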